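-- pv_equiv track=rewrite | github.com/pypi-data/pypi-mirror-201 | packages/ScribePy/ScribePy-0.1.0.tar.gz/ScribePy-0.1.0/scribepy/utils.py | strip_docstrings
-- ===== SOURCE A (Python) =====
-- def strip_docstrings(source):
--     """
--     Remove docstrings from Python source code.
--     """
--     in_docstring = False
--     lines = source.split('\n')
--     new_lines = []
--     for line in lines:
--         if in_docstring:
--             if '"""' in line:
--                 in_docstring = False
--         elif '"""' in line:
--             in_docstring = True
--         else:
--             new_lines.append(line)
--     return '\n'.join(new_lines)
-- ===== SOURCE B (Python) =====
-- def strip_docstrings(source):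
--     # Staged decomposition: first split the lines into segments delimited by
--     # marker lines (the markers themselves belong to no segment), then keep
--     # the even-indexed segments -- the code outside docstrings.
--     segments = []
--     cur = []
--     for line in source.split('\n'):
--         if '"""' in line:
--             segments.append(cur)
--             cur = []
--         else:
--             cur.append(line)
--     segments.append(cur)
--     kept = [seg for k, seg in enumerate(segments) if k % 2 == 0]
--     return '\n'.join(line for seg in kept for line in seg)
-- ===== Notes on version B (the rewrite author's own statement) =====
-- stated objective: alternative
-- what changed: Replaces the stateful in_docstring boolean-flag scan with a staged pipeline: split the lines into segments delimited by marker lines, then keep only the even-indexed segments (code outside docstrings) and flatten; no docstring flag is carried through the scan.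
import Mathlib
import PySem

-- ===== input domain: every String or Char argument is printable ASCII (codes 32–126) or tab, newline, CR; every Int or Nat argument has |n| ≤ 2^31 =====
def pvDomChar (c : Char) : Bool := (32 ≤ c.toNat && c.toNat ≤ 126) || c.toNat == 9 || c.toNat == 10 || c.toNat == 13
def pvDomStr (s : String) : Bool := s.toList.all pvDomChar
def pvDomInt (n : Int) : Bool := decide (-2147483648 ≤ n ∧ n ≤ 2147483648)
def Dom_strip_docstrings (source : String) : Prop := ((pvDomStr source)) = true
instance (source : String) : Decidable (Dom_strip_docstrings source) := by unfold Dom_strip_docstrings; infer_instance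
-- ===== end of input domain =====

-- B replaces A's boolean-flag scan with a staged pipeline: split the lines into
-- segments delimited by marker lines, keep the even-indexed segments, flatten.

-- ===== PORT A =====
-- '"""' in line
def pvMark (line : String) : Bool := PySem.Str.isIn "\"\"\"" line

-- the for-loop body of A over state (in_docstring, new_lines)
def pvStepA (s : Bool × List String) (line : String) : Bool × List String :=
  if s.1 then
    if pvMark line then (false, s.2) else s
  else if pvMark line then (true, s.2)
  else (s.1, s.2 ++ [line])

def strip_docstrings (source : String) : String :=
  -- split? is some here since the separator "\n" is nonempty (exact)
  let lines := ((PySem.Str.split? source "\n").getD [])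
  let r := lines.foldl pvStepA (false, [])
  PySem.Str.join "\n" r.2

-- ===== PORT B =====
-- the for-loop body of B over state (segments, cur)
def pvStepB (s : List (List String) × List String) (line : String) :
    List (List String) × List String :=
  if pvMark line then (s.1 ++ [s.2], []) else (s.1, s.2 ++ [line])

def strip_docstrings_alt (source : String) : String :=
  let lines := ((PySem.Str.split? source "\n").getD [])
  let r := lines.foldl pvStepB ([], [])
  let segments := r.1 ++ [r.2]
  -- [seg for k, seg in enumerate(segments) if k % 2 == 0]
  let kept := ((PySem.List.enumerate segments).filter (fun p => p.1 % 2 == 0)).map (·.2)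
  PySem.Str.join "\n" kept.flatten

-- ===== PRECONDITION & SPEC =====
def Spec_strip_docstrings (source : String) (out : String) : Prop := out = strip_docstrings_alt source
instance (source : String) (out : String) : Decidable (Spec_strip_docstrings source out) := by unfold Spec_strip_docstrings; infer_instance

-- ===== CLAIM =====
def Claim_equal_strip_docstrings : Prop := ∀ (source : String), Dom_strip_docstrings source → Spec_strip_docstrings source (strip_docstrings source)

-- ===== LEMMAS AND PROOFS =====
-- recursive characterisation of B's segment-splitting fold
def pvSplit : List String → List (List String)
  | [] => [[]]
  | l :: ls => if pvMark l then [] :: pvSplit ls else (pvSplit ls).modifyHead (l :: ·)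

-- even- and odd-indexed elements of a list
mutual
def pvEvens : List (List String) → List (List String)
  | [] => []
  | x :: S => x :: pvOdds S
def pvOdds : List (List String) → List (List String)
  | [] => []
  | _ :: S => pvEvens S
end

theorem pvSplit_ne_nil (ls : List String) : pvSplit ls ≠ [] := by
  cases ls with
  | nil => simp [pvSplit]
  | cons l ls =>
    simp only [pvSplit]
    split
    · simp
    · cases h : pvSplit ls with
      | nil => exact absurd h (pvSplit_ne_nil ls)
      | cons a t => simp [List.modifyHead]

-- B's fold accumulates exactly pvSplit
theorem pvFoldB_eq (ls : List String) : ∀ (segs : List (List String)) (cur : List String),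
    (let r := ls.foldl pvStepB (segs, cur); r.1 ++ [r.2])
      = segs ++ (pvSplit ls).modifyHead (cur ++ ·) := by
  induction ls with
  | nil => simp [pvSplit]
  | cons l ls ih =>
    intro segs cur
    by_cases h : pvMark l = true
    · simp [pvStepB, h, pvSplit, ih]
      cases pvSplit ls <;> simp [List.modifyHead]
    · simp only [List.foldl_cons, pvStepB, h, Bool.false_eq_true, if_false, pvSplit]
      rw [ih]
      cases hs : pvSplit ls with
      | nil => exact absurd hs (pvSplit_ne_nil ls)
      | cons a t => simp [List.modifyHead]

-- A's fold with flag false collects the even segments, with flag true the odd ones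
theorem pvFoldA_eq (ls : List String) : ∀ acc : List String,
    (ls.foldl pvStepA (false, acc)).2 = acc ++ (pvEvens (pvSplit ls)).flatten ∧
    (ls.foldl pvStepA (true, acc)).2 = acc ++ (pvOdds (pvSplit ls)).flatten := by
  induction ls with
  | nil => simp [pvSplit, pvEvens, pvOdds]
  | cons l ls ih =>
    intro acc
    by_cases h : pvMark l = true
    · simp [pvStepA, h, pvSplit, pvEvens, pvOdds, ih acc]
    · simp only [List.foldl_cons, pvStepA, h, Bool.false_eq_true, if_false, if_true]
      cases hs : pvSplit ls with
      | nil => exact absurd hs (pvSplit_ne_nil ls)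
      | cons a t =>
        constructor
        · have := (ih (acc ++ [l])).1
          simp [hs, pvEvens] at this ⊢
          simp [pvSplit, h, hs, List.modifyHead, pvEvens, this]
        · have := (ih acc).2
          simp [hs, pvOdds] at this ⊢
          simp [pvSplit, h, hs, List.modifyHead, pvOdds, this]

-- the enumerate-filter in B picks exactly the even-indexed segments
theorem pvEnumFilter_eq (S : List (List String)) : ∀ n : Int,
    (((PySem.List.enumerate S (2 * n)).filter (fun p => p.1 % 2 == 0)).map (·.2)
        = pvEvens S) ∧
    (((PySem.List.enumerate S (2 * n + 1)).filter (fun p => p.1 % 2 == 0)).map (·.2)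
        = pvOdds S) := by
  induction S with
  | nil => simp [PySem.List.enumerate_nil, pvEvens, pvOdds]
  | cons x S ih =>
    intro n
    constructor
    · have h2 : (2 * n) % 2 = 0 := by omega
      have := (ih n).2
      simp [PySem.List.enumerate_cons, h2, pvEvens, this]
    · have h2 : (2 * n + 1) % 2 = 1 := by omega
      have heq : (2 * n + 1) + 1 = 2 * (n + 1) := by ring
      have := (ih (n + 1)).1
      simp [PySem.List.enumerate_cons, h2, pvOdds, heq, this]

-- ===== VERDICT =====
theorem strip_docstrings_spec : Claim_equal_strip_docstrings := by
  intro source _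
  unfold Spec_strip_docstrings strip_docstrings strip_docstrings_alt
  have hB := pvFoldB_eq (((PySem.Str.split? source "\n").getD [])) [] []
  have hid : (pvSplit (((PySem.Str.split? source "\n").getD []))).modifyHead
      (((([] : List String)) ++ ·)) = pvSplit (((PySem.Str.split? source "\n").getD [])) := by
    cases pvSplit (((PySem.Str.split? source "\n").getD [])) <;> simp [List.modifyHead]
  rw [hid] at hB
  have hE := (pvEnumFilter_eq (pvSplit (((PySem.Str.split? source "\n").getD []))) 0).1
  have hA := (pvFoldA_eq (((PySem.Str.split? source "\n").getD [])) []).1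
  norm_num at hE hA hB
  simp only [hB, hE, hA]
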